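-- pv_equiv track=rewrite | github.com/aviraldua93/wiki-recall | engine/harvest.py | extract_project_mentions
-- ===== SOURCE A (Python) =====
-- def extract_project_mentions(
--     summary: str,
--     known_projects: list[str],
-- ) -> list[str]:
--     """Find which known projects are mentioned in a session summary."""
--     if not summary:
--         return []
--     summary_lower = summary.lower()
--     return [p for p in known_projects if p.lower() in summary_lower]
-- ===== SOURCE B (Python) =====
-- def extract_project_mentions(
--     summary: str,
--     known_projects: list[str],
-- ) -> list[str]:
--     """Find which known projects are mentioned in a session summary."""
--     if not summary:
--         return []
--     s = summary.lower()
--     lowered = [p.lower() for p in known_projects]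
--     grams = {l: {s[i:i + l] for i in range(len(s) - l + 1)}
--              for l in {len(q) for q in lowered}}
--     return [p for p, q in zip(known_projects, lowered) if q in grams[len(q)]]
-- ===== Notes on version B (the rewrite author's own statement) =====
-- stated objective: faster
-- what changed: B replaces the per-project substring scan of the summary ('p.lower() in summary_lower') by building, once per distinct lowered-pattern length, the set of all summary substrings of that length, then answering each project with a single hash-set lookup.
import Mathlib
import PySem

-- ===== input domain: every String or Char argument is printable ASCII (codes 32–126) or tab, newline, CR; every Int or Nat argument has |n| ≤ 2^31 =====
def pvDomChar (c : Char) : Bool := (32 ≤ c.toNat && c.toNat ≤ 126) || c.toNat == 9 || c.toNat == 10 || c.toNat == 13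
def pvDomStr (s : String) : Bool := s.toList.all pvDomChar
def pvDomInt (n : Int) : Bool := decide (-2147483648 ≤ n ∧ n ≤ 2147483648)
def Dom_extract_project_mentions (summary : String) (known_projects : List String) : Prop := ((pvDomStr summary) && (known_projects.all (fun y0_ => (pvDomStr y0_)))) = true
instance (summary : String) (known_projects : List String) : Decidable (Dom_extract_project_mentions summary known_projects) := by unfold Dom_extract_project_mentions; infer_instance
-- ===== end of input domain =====

-- ===== PORT A =====
-- A tests each project with 'p.lower() in summary.lower()' (a fresh substring scan per project);
-- B instead indexes the lowered summary once per distinct pattern length (a set of its length-l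
-- substrings) and answers each project by one set lookup (alternative algorithm).
def extract_project_mentions (summary : String) (known_projects : List String) : List String :=
  if summary = "" then []                      -- 'if not summary: return []'
  else
    let summary_lower := PySem.Str.lower summary
    known_projects.filter (fun p => PySem.Str.isIn (PySem.Str.lower p) summary_lower)

-- ===== PORT B =====
def extract_project_mentions_alt (summary : String) (known_projects : List String) : List String :=
  if summary = "" then []
  else
    let s := PySem.Chars.lower summary.toList
    let lowered := known_projects.map (fun p => PySem.Chars.lower p.toList)
    let lengths : PySem.Set Int := PySem.Set.ofList (lowered.map (fun q => PySem.Chars.len q))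
    let grams : PySem.Dict Int (PySem.Set (List Char)) :=
      PySem.Dict.ofList (lengths.map (fun l =>
        (l, PySem.Set.ofList ((PySem.List.pyRange 0 (PySem.Chars.len s - l + 1) 1).map
              (fun i => PySem.List.slice s (some i) (some (i + l)))))))
    -- 'q in grams[len(q)]': the key len(q) is always present, so the getD default is never read
    ((known_projects.zip lowered).filter (fun pq =>
        (grams.getD (PySem.Chars.len pq.2) PySem.Set.empty).contains pq.2)).map (fun pq => pq.1)

-- ===== PRECONDITION & SPEC =====
def Spec_extract_project_mentions (summary : String) (known_projects : List String) (out : List String) : Prop := out = extract_project_mentions_alt summary known_projects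
instance (summary : String) (known_projects : List String) (out : List String) : Decidable (Spec_extract_project_mentions summary known_projects out) := by unfold Spec_extract_project_mentions; infer_instance

-- ===== CLAIM (what is proved, stated in full; the proofs are below) =====
def Claim_equal_extract_project_mentions : Prop := ∀ (summary : String) (known_projects : List String), Dom_extract_project_mentions summary known_projects → Spec_extract_project_mentions summary known_projects (extract_project_mentions summary known_projects)

-- ===== LEMMAS AND PROOFS =====

-- Looking up a key of a dict built from (k, f k) pairs with distinct keys gives f k.
theorem pv_getD_ofList_map {ν : Type} (xs : List Int) (f : Int → ν) (l : Int) (d : ν)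
    (hmem : l ∈ xs) :
    (PySem.Dict.ofList (xs.map (fun k => (k, f k)))).getD l d = f l := by
  refine PySem.Dict.getD_of_get?_eq_some _ d ?_
  have key : ∀ (xs : List Int) (d0 : PySem.Dict Int ν),
      ((xs.map (fun k => (k, f k))).foldl (fun acc p => acc.insert p.1 p.2) d0).get? l
        = if l ∈ xs then some (f l) else d0.get? l := by
    intro xs
    induction xs with
    | nil => intro d0; simp
    | cons a t ih =>
      intro d0
      simp only [List.map_cons, List.foldl_cons, ih, List.mem_cons]
      by_cases ht : l ∈ t
      · simp [ht]
      · simp only [ht, if_false, or_false, PySem.Dict.get?_insert]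
        by_cases ha : l = a <;> simp [ha]
  simpa [PySem.Dict.ofList, PySem.Dict.update, hmem] using key xs PySem.Dict.empty
-- (an if on ∨ needed splitting; handled inside 'key')

-- pat occurs among the length-|pat| slices of s  ↔  pat in s.
theorem pv_mem_grams (s pat : List Char) :
    (pat ∈ (PySem.List.pyRange 0 (PySem.Chars.len s - PySem.Chars.len pat + 1) 1).map
        (fun i => PySem.List.slice s (some i) (some (i + PySem.Chars.len pat))))
      ↔ PySem.Chars.isIn pat s = true := by
  rw [← PySem.Chars.exists_prefix_drop_iff_isIn]
  simp only [List.mem_map, PySem.List.mem_pyRange_one, PySem.Chars.len_eq]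
  constructor
  · rintro ⟨i, ⟨hi0, hi1⟩, hslice⟩
    refine ⟨i.toNat, ?_⟩
    rw [PySem.List.slice_toNat s hi0 (by positivity)] at hslice
    have hlen : (i + (pat.length : Int)).toNat - i.toNat = pat.length := by omega
    rw [hlen] at hslice
    rw [← hslice]
    exact List.take_prefix _ _
  · rintro ⟨j, hpre⟩
    by_cases hp : pat = []
    · refine ⟨0, ⟨le_refl 0, by rw [hp]; simp only [List.length_nil, Nat.cast_zero]; omega⟩, ?_⟩
      rw [hp]
      simp [PySem.List.slice_toNat s (le_refl (0:Int)) (le_refl (0:Int))]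
    · have hble : pat.length ≤ s.length - j := by
        simpa using hpre.length_le
      have hplen : 0 < pat.length := List.length_pos_iff.mpr hp
      refine ⟨(j : Int), ⟨Int.natCast_nonneg j, by omega⟩, ?_⟩
      rw [PySem.List.slice_toNat s (Int.natCast_nonneg j) (by positivity)]
      have hlen : ((j : Int) + (pat.length : Int)).toNat - (j : Int).toNat = pat.length := by
        omega
      rw [hlen, Int.toNat_natCast]
      exact (List.prefix_iff_eq_take.mp hpre).symm
-- (hble: a prefix is no longer than the list it prefixes; drop j has length s.length - j)

-- zip a list with a map over itself, filter on the second component, project the first: a filter.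
theorem pv_zip_filter {α β : Type} (xs : List α) (f : α → β) (g : β → Bool) :
    (((xs.zip (xs.map f)).filter (fun pm => g pm.2)).map (fun pm => pm.1)) = xs.filter (fun x => g (f x)) := by
  induction xs with
  | nil => rfl
  | cons x rest ih =>
    by_cases hx : g (f x) <;> simp [hx, ih]

-- ===== VERDICT (by name: the statement is the Claim_ definition above) =====
theorem extract_project_mentions_spec : Claim_equal_extract_project_mentions := by
  intro summary known_projects _
  unfold Spec_extract_project_mentions extract_project_mentions extract_project_mentions_alt
  by_cases hs : summary = ""
  · simp [hs]
  · simp only [hs, if_false]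
    rw [pv_zip_filter known_projects (fun p => PySem.Chars.lower p.toList)
      (fun q => ((PySem.Dict.ofList
          (((PySem.Set.ofList ((known_projects.map (fun p => PySem.Chars.lower p.toList)).map
              (fun q => PySem.Chars.len q)))).map (fun l =>
            (l, PySem.Set.ofList ((PySem.List.pyRange 0
                  (PySem.Chars.len (PySem.Chars.lower summary.toList) - l + 1) 1).map
              (fun i => PySem.List.slice (PySem.Chars.lower summary.toList) (some i) (some (i + l)))))))).getD
        (PySem.Chars.len q) PySem.Set.empty).contains q)]
    refine (List.filter_congr (fun p hp => ?_)).symm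
    set s := PySem.Chars.lower summary.toList with hsdef
    set q := PySem.Chars.lower p.toList with hqdef
    have hmem : PySem.Chars.len q ∈
        PySem.Set.ofList ((known_projects.map (fun p => PySem.Chars.lower p.toList)).map
          (fun q => PySem.Chars.len q)) := by
      rw [PySem.Set.mem_ofList]
      exact List.mem_map_of_mem (List.mem_map_of_mem hp)
    rw [pv_getD_ofList_map _ _ _ _ hmem]
    have := pv_mem_grams s q
    rw [← PySem.Set.mem_ofList] at this
    rw [PySem.Str.isIn_eq]
    simp only [PySem.Str.toList_lower]
    cases hin : PySem.Chars.isIn q s with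
    | true => simpa [PySem.Set.contains_iff, hin] using this.mpr hin
    | false =>
      rw [← Bool.not_eq_true, PySem.Set.contains_iff]
      intro hc
      rw [this.mp hc] at hin
      exact Bool.noConfusion hin
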